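-- pv_equiv track=rewrite | github.com/fendy07/shift-schedule | solve_employee.py | convertToSchedule
-- ===== SOURCE A (Python) =====
-- def convertToSchedule(individual):
--     schedule = []
--     for i, bit in enumerate(individual):
--         day = i // 3
--         shift = i % 3
--         if bit == 1:
--             schedule.append(f"Day {day + 1}, Shift {shift + 1}")
--     return schedule
-- ===== SOURCE B (Python) =====
-- def convertToSchedule(individual):
--     # Stage 1: build the full label table, one whole day (3 labels) at a time.
--     labels = []
--     day = 1
--     while len(labels) < len(individual):
--         labels.append(f"Day {day}, Shift 1")
--         labels.append(f"Day {day}, Shift 2")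
--         labels.append(f"Day {day}, Shift 3")
--         day += 1
--     # Stage 2: select the labels whose bit is set.
--     return [lab for lab, bit in zip(labels, individual) if bit == 1]
-- ===== Notes on version B (the rewrite author's own statement) =====
-- stated objective: alternative
-- what changed: Two staged passes replace A's fused loop: first a label table for all days is precomputed (three literal shift labels per day, no index div/mod at all), then the answer is a zip-filter of that table against the bit list.
import Mathlib
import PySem

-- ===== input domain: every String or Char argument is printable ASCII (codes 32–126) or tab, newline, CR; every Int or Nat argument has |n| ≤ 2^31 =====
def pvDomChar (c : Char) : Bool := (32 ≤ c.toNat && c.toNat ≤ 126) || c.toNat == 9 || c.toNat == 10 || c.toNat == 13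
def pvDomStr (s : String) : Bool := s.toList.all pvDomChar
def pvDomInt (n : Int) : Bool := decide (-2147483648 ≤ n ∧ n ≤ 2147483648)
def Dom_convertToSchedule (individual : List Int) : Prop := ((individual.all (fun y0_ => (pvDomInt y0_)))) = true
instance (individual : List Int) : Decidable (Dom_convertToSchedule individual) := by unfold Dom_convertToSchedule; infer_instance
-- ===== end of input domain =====

-- B replaces A's fused index loop (day = i//3, shift = i%3) by two staged passes: a precomputed
-- per-day label table, then a zip-filter of the table against the bits (objective: alternative).

-- ===== PORT A =====
-- one flat pass over enumerate(individual); i >= 0 so '//' and '%' are ported via PySem.Int.floordiv/mod exactly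
def convertToSchedule (individual : List Int) : List String :=
  (PySem.List.enumerate individual 0).foldl
    (fun schedule p =>
      let day := PySem.Int.floordiv p.1 3
      let shift := PySem.Int.mod p.1 3
      if p.2 == 1 then
        schedule ++ ["Day " ++ PySem.Int.toStr (day + 1) ++ ", Shift " ++ PySem.Int.toStr (shift + 1)]
      else schedule)
    []

-- ===== PORT B =====
-- stage 1 of Source B: the while-loop appending three literal labels per day, as recursion on the remaining length
def pvBuildLabels (n : Nat) (labels : List String) (day : Int) : List String :=
  if labels.length < n then
    pvBuildLabels n
      (labels ++ ["Day " ++ PySem.Int.toStr day ++ ", Shift 1",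
                  "Day " ++ PySem.Int.toStr day ++ ", Shift 2",
                  "Day " ++ PySem.Int.toStr day ++ ", Shift 3"]) (day + 1)
  else labels
termination_by n - labels.length
decreasing_by simp; omega

-- stage 2 of Source B: the list comprehension over zip(labels, individual)
def convertToSchedule_alt (individual : List Int) : List String :=
  let labels := pvBuildLabels individual.length [] 1
  ((labels.zip individual).filter (fun p => p.2 == 1)).map Prod.fst

-- ===== PRECONDITION & SPEC =====
def Spec_convertToSchedule (individual : List Int) (out : List String) : Prop := out = convertToSchedule_alt individual
instance (individual : List Int) (out : List String) : Decidable (Spec_convertToSchedule individual out) := by unfold Spec_convertToSchedule; infer_instance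

-- ===== CLAIM (what is proved, stated in full; the proofs are below) =====
def Claim_equal_convertToSchedule : Prop := ∀ (individual : List Int), Dom_convertToSchedule individual → Spec_convertToSchedule individual (convertToSchedule individual)

-- ===== LEMMAS AND PROOFS =====

-- the entry printed for flat index i
def pvMk (i : Nat) : String :=
  "Day " ++ PySem.Int.toStr ((i / 3 : Nat) + 1) ++ ", Shift " ++ PySem.Int.toStr ((i % 3 : Nat) + 1)

-- canonical form both ports are reduced to
def pvCanon (l : List Int) : List String :=
  ((List.range l.length).filter (fun i => l.getD i 0 == 1)).map pvMk

lemma pvA_eq (l : List Int) : convertToSchedule l = pvCanon l := by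
  unfold convertToSchedule pvCanon
  rw [PySem.List.enumerate_eq_map_pyRange l 0]
  rw [PySem.List.foldl_append_if]
  rw [show PySem.List.pyRange 0 (PySem.List.len l) 1 = (List.range l.length).map (Nat.cast) from
    PySem.List.pyRange_zero_nat l.length]
  simp [List.filter_map, List.map_map, Function.comp_def, pvMk]

lemma pvMk_at (d k : Nat) (hk : k < 3) :
    pvMk (3 * d + k) = "Day " ++ PySem.Int.toStr ((d : Int) + 1) ++ ", Shift " ++ PySem.Int.toStr ((k : Int) + 1) := by
  unfold pvMk
  have h1 : (3 * d + k) / 3 = d := by omega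
  have h2 : (3 * d + k) % 3 = k := by omega
  rw [h1, h2]

lemma pvShiftLit (s : String) (k : Int) (t : String) (h : ", Shift " ++ PySem.Int.toStr k = t) :
    s ++ t = s ++ ", Shift " ++ PySem.Int.toStr k := by
  rw [String.append_assoc, h]


-- invariant of stage 1: a correct prefix of length 3*d grows into a correct table of length >= n
lemma pvBuild_spec (n : Nat) : ∀ (m d : Nat) (labels : List String),
    n - labels.length ≤ m → labels.length = 3 * d →
    (∀ j, j < labels.length → labels[j]! = pvMk j) →
    n ≤ (pvBuildLabels n labels ((d : Int) + 1)).length ∧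
      ∀ j, j < (pvBuildLabels n labels ((d : Int) + 1)).length →
        (pvBuildLabels n labels ((d : Int) + 1))[j]! = pvMk j := by
  intro m
  induction m with
  | zero =>
    intro d labels hm hlen hget
    rw [pvBuildLabels]
    have : ¬ labels.length < n := by omega
    simp only [this, if_false]
    exact ⟨by omega, hget⟩
  | succ m ih =>
    intro d labels hm hlen hget
    rw [pvBuildLabels]
    by_cases hlt : labels.length < n
    · simp only [hlt, if_true]
      have hcast : ((d : Int) + 1) + 1 = ((d + 1 : Nat) : Int) + 1 := by push_cast; ring
      rw [hcast]
      apply ih (d + 1)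
      · simp; omega
      · simp; omega
      · intro j hj
        simp only [List.length_append, List.length_cons, List.length_nil] at hj
        by_cases hjl : j < labels.length
        · rw [List.getElem!_eq_getElem?_getD, List.getElem?_append_left hjl,
            ← List.getElem!_eq_getElem?_getD]
          exact hget j hjl
        · have hk : j - labels.length < 3 := by omega
          have hj3 : j = 3 * d + (j - labels.length) := by omega
          rw [List.getElem!_eq_getElem?_getD, List.getElem?_append_right (by omega), hlen]
          rw [hj3, pvMk_at d (j - labels.length) hk]
          have hsub : 3 * d + (j - labels.length) - 3 * d = j - labels.length := by omega
          rw [hsub]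
          interval_cases h : (j - labels.length) <;>
            simp <;> exact pvShiftLit _ _ _ (by decide)
    · simp only [hlt, if_false]
      exact ⟨by omega, hget⟩

-- the zip-filter of a correct label table equals the canonical form (offset i for the induction)
lemma pvZip (l : List Int) : ∀ (i : Nat) (labels : List String),
    l.length ≤ labels.length →
    (∀ j, (hj : j < l.length) → labels[j]! = pvMk (i + j)) →
    ((labels.zip l).filter (fun p => p.2 == 1)).map Prod.fst
      = ((List.range l.length).filter (fun j => l.getD j 0 == 1)).map (fun j => pvMk (i + j)) := by
  induction l with
  | nil => intro i labels _ _; simp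
  | cons b rest ih =>
    intro i labels hlen hget
    match labels with
    | [] => simp at hlen
    | lab :: labs =>
      have hlab : lab = pvMk (i + 0) := by
        have := hget 0 (by simp)
        simpa using this
      have hstep := ih (i + 1) labs (by simpa using hlen)
        (fun j hj => by
          have h0 := hget (j + 1) (by simp; omega)
          rw [show i + (j + 1) = i + 1 + j from by omega] at h0
          simpa using h0)
      have hrange : List.range (rest.length + 1) = 0 :: (List.range rest.length).map Nat.succ :=
        List.range_succ_eq_map
      have hmapside :
          ((List.range rest.length).map Nat.succ |>.filter
              (fun j => (b :: rest).getD j 0 == 1)).map (fun j => pvMk (i + j))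
            = ((List.range rest.length).filter (fun j => rest.getD j 0 == 1)).map
                (fun j => pvMk (i + 1 + j)) := by
        rw [List.filter_map, List.map_map]
        have h1 : ((fun j => (b :: rest).getD j 0 == 1) ∘ Nat.succ) = (fun j => rest.getD j 0 == 1) := by
          funext j; simp
        rw [h1]
        apply List.map_congr_left
        intro j hj
        simp only [Function.comp_def, Nat.succ_eq_add_one]
        rw [show i + (j + 1) = i + 1 + j from by omega]
      by_cases hb : b = 1
      · subst hb
        simp only [List.zip_cons_cons, List.length_cons, hrange, List.filter_cons,
          List.getD_cons_zero, show ((1 : Int) == 1) = true from rfl, if_true, List.map_cons]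
        rw [hstep, ← hmapside]
        simp [hlab]
      · have hb' : (b == 1) = false := by simpa using hb
        simp only [List.zip_cons_cons, List.length_cons, hrange, List.filter_cons,
          List.getD_cons_zero, hb', Bool.false_eq_true, if_false]
        rw [hstep, ← hmapside]

lemma pvB_eq (l : List Int) : convertToSchedule_alt l = pvCanon l := by
  unfold convertToSchedule_alt pvCanon
  have hb := pvBuild_spec l.length l.length 0 [] (by simp) (by simp) (by intro j hj; simp at hj)
  have h1 : ((0 : Nat) : Int) + 1 = 1 := by norm_num
  rw [h1] at hb
  have := pvZip l 0 (pvBuildLabels l.length [] 1) hb.1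
    (fun j hj => by simpa using hb.2 j (by omega))
  simpa using this

-- ===== VERDICT (by name: the statement is the Claim_ definition above) =====
theorem convertToSchedule_spec : Claim_equal_convertToSchedule := by
  intro l _
  unfold Spec_convertToSchedule
  rw [pvA_eq, pvB_eq]
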